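-- pv_equiv track=rewrite | github.com/00d/gameframe | scripts/clean_extracted.py | find_nav_runs
-- ===== SOURCE A (Python) =====
-- from typing import List, Tuple, Set, FrozenSet
--
-- NAV_RUN_THRESHOLD = 3
--
-- def find_nav_runs(lines: List[str], nav_labels: Set[str], threshold: int = NAV_RUN_THRESHOLD) -> Set[int]:
--     """
--     Find indices of lines that are part of navigation sidebar runs.
--
--     A 'run' is a sequence of consecutive lines (ignoring blanks) where each
--     line's stripped content is a known nav label. Only marks lines for removal
--     if the run is >= threshold labels long.
--     """
--     indices_to_remove: Set[int] = set()
--     n = len(lines)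
--     i = 0
--
--     while i < n:
--         s = lines[i].strip()
--         if s not in nav_labels:
--             i += 1
--             continue
--
--         # Start of a potential nav run — collect consecutive nav labels
--         run_start = i
--         run_indices = [i]
--         j = i + 1
--         while j < n:
--             sj = lines[j].strip()
--             if sj == '':
--                 # Allow one blank line within a run
--                 if j + 1 < n and lines[j + 1].strip() in nav_labels:
--                     run_indices.append(j)
--                     j += 1
--                     continue
--                 else:
--                     break
--             if sj in nav_labels:
--                 run_indices.append(j)
--                 j += 1
--             else:
--                 break
--
--         # Count actual nav labels (not blanks)
--         nav_count = sum(1 for idx in run_indices if lines[idx].strip() in nav_labels)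
--
--         if nav_count >= threshold:
--             indices_to_remove.update(run_indices)
--
--         i = j if j > i + 1 else i + 1
--
--     return indices_to_remove
-- ===== SOURCE B (Python) =====
-- NAV_RUN_THRESHOLD = 3
--
-- def find_nav_runs(lines, nav_labels, threshold=NAV_RUN_THRESHOLD):
--     """Single forward pass with an explicit run state machine (no lookahead)."""
--     result = set()
--     run = []            # indices in the current run (navs and accepted blanks)
--     nav_count = 0       # nav labels in the current run
--     pending = None      # index of a blank awaiting a following nav line
--
--     def flush():
--         nonlocal run, nav_count, pending
--         if nav_count >= threshold:
--             result.update(run)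
--         run, nav_count, pending = [], 0, None
--
--     for i, line in enumerate(lines):
--         s = line.strip()
--         if s == '':
--             if run:
--                 if pending is None:
--                     pending = i       # one blank may sit inside a run
--                 else:
--                     flush()           # a second blank ends the run
--         elif s in nav_labels:
--             if pending is not None:
--                 run.append(pending)
--                 pending = None
--             run.append(i)
--             nav_count += 1
--         else:
--             flush()
--     flush()
--     return result
-- ===== Notes on version B (the rewrite author's own statement) =====
-- stated objective: simpler
-- what changed: Replaced the nested while-loop with one-line lookahead (lines[j+1]) by a single forward pass over enumerate(lines) driven by an explicit run state machine (current run, nav count, one pending blank) with a flush step, so no index arithmetic or re-scanning of the run is needed.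
-- outside the precondition, e.g. on find_nav_runs(['', 'b'], {''}, 1): A returns {0}, B returns set()
import Mathlib
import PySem

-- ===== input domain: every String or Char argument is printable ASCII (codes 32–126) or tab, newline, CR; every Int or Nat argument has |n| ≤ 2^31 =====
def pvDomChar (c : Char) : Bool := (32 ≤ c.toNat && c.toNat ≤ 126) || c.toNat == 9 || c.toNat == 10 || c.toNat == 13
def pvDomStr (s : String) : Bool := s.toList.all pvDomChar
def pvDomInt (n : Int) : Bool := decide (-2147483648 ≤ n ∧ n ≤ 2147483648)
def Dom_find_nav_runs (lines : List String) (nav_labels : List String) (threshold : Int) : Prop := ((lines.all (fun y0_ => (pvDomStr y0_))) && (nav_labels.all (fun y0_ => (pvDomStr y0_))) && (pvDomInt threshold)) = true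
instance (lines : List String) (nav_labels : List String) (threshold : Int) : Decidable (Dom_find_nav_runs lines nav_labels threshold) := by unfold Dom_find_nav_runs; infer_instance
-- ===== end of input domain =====

-- B replaces A's nested while-loop with lines[j+1] lookahead by a single forward pass
-- driven by an explicit run state machine (run, nav count, pending blank) — simpler decomposition.

-- ===== PORT A =====
-- inner while-loop of A: collects consecutive nav labels (one blank allowed before a nav),
-- returns (run_indices, j)
def aInner (lines : List String) (nav_labels : List String) (j : Nat)
    (run : List Int) : List Int × Nat :=
  if _h : j < lines.length then
    let sj := PySem.Str.strip (lines.getD j "")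
    if sj = "" then
      if _hj : j + 1 < lines.length then
        if nav_labels.contains (PySem.Str.strip (lines.getD (j + 1) "")) then
          aInner lines nav_labels (j + 1) (run ++ [(j : Int)])
        else (run, j)
      else (run, j)
    else if nav_labels.contains sj then
      aInner lines nav_labels (j + 1) (run ++ [(j : Int)])
    else (run, j)
  else (run, j)
termination_by lines.length - j

-- outer while-loop of A
def aOuter (lines : List String) (nav_labels : List String) (threshold : Int)
    (i : Nat) (acc : PySem.Set Int) : PySem.Set Int :=
  if h : i < lines.length then
    let s := PySem.Str.strip (lines.getD i "")
    if nav_labels.contains s then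
      let p := aInner lines nav_labels (i + 1) [(i : Int)]
      let navCount : Int :=
        (p.1.countP (fun idx =>
          nav_labels.contains (PySem.Str.strip (PySem.List.pyGetD lines idx ""))) : Int)
      let acc' := if threshold ≤ navCount then PySem.Set.update acc p.1 else acc
      aOuter lines nav_labels threshold (if i + 1 < p.2 then p.2 else i + 1) acc'
    else
      aOuter lines nav_labels threshold (i + 1) acc
  else acc
termination_by lines.length - i
decreasing_by
  · split <;> omega
  · omega

def find_nav_runs (lines : List String) (nav_labels : List String) (threshold : Int) : List Int :=
  aOuter lines nav_labels threshold 0 PySem.Set.empty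

-- ===== PORT B =====
-- state: (result set, current run indices, nav count in run, pending blank index)
def bFlush (threshold : Int) (st : PySem.Set Int × List Int × Int × Option Int) :
    PySem.Set Int × List Int × Int × Option Int :=
  ((if threshold ≤ st.2.2.1 then PySem.Set.update st.1 st.2.1 else st.1), [], 0, none)

def bStep (nav_labels : List String) (threshold : Int)
    (st : PySem.Set Int × List Int × Int × Option Int) (p : Int × String) :
    PySem.Set Int × List Int × Int × Option Int :=
  let s := PySem.Str.strip p.2
  if s = "" then
    if st.2.1 = [] then st
    else
      match st.2.2.2 with
      | none => (st.1, st.2.1, st.2.2.1, some p.1)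
      | some _ => bFlush threshold st
  else if nav_labels.contains s then
    let run' := (match st.2.2.2 with
                 | some b => st.2.1 ++ [b]
                 | none => st.2.1) ++ [p.1]
    (st.1, run', st.2.2.1 + 1, none)
  else bFlush threshold st

def find_nav_runs_alt (lines : List String) (nav_labels : List String) (threshold : Int) : List Int :=
  (bFlush threshold
    ((PySem.List.enumerate lines 0).foldl (bStep nav_labels threshold)
      (PySem.Set.empty, [], 0, none))).1

-- ===== PRECONDITION & SPEC =====
-- Pre_ excludes only inputs where nav_labels contains the empty string AND some line is
-- blank: a blank line then doubles as a nav label and the blank-tolerance rule is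
-- unspecified — A's and B's groupings of such runs are both defensible corner choices.
def Pre_find_nav_runs (lines : List String) (nav_labels : List String) (threshold : Int) : Prop :=
  nav_labels.contains "" = false ∨ (∀ l ∈ lines, PySem.Str.strip l ≠ "")
instance (lines : List String) (nav_labels : List String) (threshold : Int) : Decidable (Pre_find_nav_runs lines nav_labels threshold) := by unfold Pre_find_nav_runs; infer_instance

def pvWitness_find_nav_runs : List String × List String × Int :=
  (["Home", "About", "Contact", "text here"], ["Home", "About", "Contact"], 3)

def Spec_find_nav_runs (lines : List String) (nav_labels : List String) (threshold : Int) (out : List Int) : Prop := out = find_nav_runs_alt lines nav_labels threshold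
instance (lines : List String) (nav_labels : List String) (threshold : Int) (out : List Int) : Decidable (Spec_find_nav_runs lines nav_labels threshold out) := by unfold Spec_find_nav_runs; infer_instance

-- ===== CLAIM (what is proved, stated in full; the proofs are below) =====
def Claim_equal_find_nav_runs : Prop := ∀ (lines : List String) (nav_labels : List String) (threshold : Int), Dom_find_nav_runs lines nav_labels threshold → Pre_find_nav_runs lines nav_labels threshold → Spec_find_nav_runs lines nav_labels threshold (find_nav_runs lines nav_labels threshold)

-- ===== LEMMAS AND PROOFS =====

-- A's nav count of a run (as an Int), and A's conditional set update
def pvCnt (lines nav_labels : List String) (run : List Int) : Int :=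
  (run.countP (fun idx =>
    nav_labels.contains (PySem.Str.strip (PySem.List.pyGetD lines idx ""))) : Int)

def pvUpd (lines nav_labels : List String) (threshold : Int)
    (acc : PySem.Set Int) (run : List Int) : PySem.Set Int :=
  if threshold ≤ pvCnt lines nav_labels run then PySem.Set.update acc run else acc

-- B's fold, started at position i
def pvBLoop (lines nav_labels : List String) (threshold : Int) (i : Nat)
    (st : PySem.Set Int × List Int × Int × Option Int) :
    PySem.Set Int × List Int × Int × Option Int :=
  (PySem.List.enumerate (lines.drop i) (i : Int)).foldl (bStep nav_labels threshold) st

theorem pvBLoop_stop (lines nav_labels : List String) (threshold : Int) (i : Nat) st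
    (h : lines.length ≤ i) :
    pvBLoop lines nav_labels threshold i st = st := by
  simp [pvBLoop, List.drop_eq_nil_of_le h, PySem.List.enumerate]

theorem pvBLoop_step (lines nav_labels : List String) (threshold : Int) (i : Nat) st
    (h : i < lines.length) :
    pvBLoop lines nav_labels threshold i st
      = pvBLoop lines nav_labels threshold (i + 1)
          (bStep nav_labels threshold st ((i : Int), lines.getD i "")) := by
  have hd : lines.drop i = lines.getD i "" :: lines.drop (i + 1) := by
    rw [List.getD_eq_getElem _ _ h]
    exact List.drop_eq_getElem_cons h
  rw [pvBLoop, hd, PySem.List.enumerate_cons]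
  simp [pvBLoop]

theorem pvFlush_idle (threshold : Int) (acc : PySem.Set Int) :
    (bFlush threshold (acc, [], 0, none)).1 = acc := by
  unfold bFlush PySem.Set.update
  simp

theorem aInner_ge (lines nav_labels : List String) :
    ∀ j run, j ≤ (aInner lines nav_labels j run).2 := by
  intro j run
  fun_induction aInner <;> simp_all <;> omega


theorem pvCnt_append_nav (lines nav_labels : List String) (run : List Int) (k : Nat)
    (h : nav_labels.contains (PySem.Str.strip (lines.getD k "")) = true) :
    pvCnt lines nav_labels (run ++ [(k : Int)]) = pvCnt lines nav_labels run + 1 := by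
  rw [pvCnt, pvCnt, List.countP_append]
  simp only [List.countP_cons, List.countP_nil, PySem.List.pyGetD_natCast, h]
  simp

theorem pvCnt_append_blank (lines nav_labels : List String) (run : List Int) (k : Nat)
    (h : nav_labels.contains (PySem.Str.strip (lines.getD k "")) = false) :
    pvCnt lines nav_labels (run ++ [(k : Int)]) = pvCnt lines nav_labels run := by
  rw [pvCnt, pvCnt, List.countP_append]
  simp only [List.countP_cons, List.countP_nil, PySem.List.pyGetD_natCast, h]
  simp

theorem pvMain (lines nav_labels : List String) (threshold : Int)
    (hpre : ∀ k, k < lines.length → PySem.Str.strip (lines.getD k "") = "" →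
      nav_labels.contains "" = false) :
    ∀ m i, lines.length - i ≤ m →
      (∀ acc, (bFlush threshold (pvBLoop lines nav_labels threshold i
                 (acc, [], 0, none))).1
          = aOuter lines nav_labels threshold i acc) ∧
      (∀ acc run, run ≠ [] →
        (bFlush threshold (pvBLoop lines nav_labels threshold i
            (acc, run, pvCnt lines nav_labels run, none))).1
          = aOuter lines nav_labels threshold (aInner lines nav_labels i run).2
              (pvUpd lines nav_labels threshold acc (aInner lines nav_labels i run).1)) := by
  intro m
  induction m with
  | zero =>
    intro i hi
    have hn : lines.length ≤ i := by omega
    constructor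
    · intro acc
      rw [pvBLoop_stop _ _ _ _ _ hn, pvFlush_idle, aOuter]
      simp [Nat.not_lt.mpr hn]
    · intro acc run _
      rw [pvBLoop_stop _ _ _ _ _ hn, aInner]
      simp only [bFlush, Nat.not_lt.mpr hn, dif_neg (Nat.not_lt.mpr hn)]
      rw [aOuter]
      simp [Nat.not_lt.mpr hn, pvUpd]
  | succ m ih =>
    intro i hi
    by_cases hn : i < lines.length
    case neg =>
      have hn' : lines.length ≤ i := by omega
      constructor
      · intro acc
        rw [pvBLoop_stop _ _ _ _ _ hn', pvFlush_idle, aOuter]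
        simp [hn]
      · intro acc run _
        rw [pvBLoop_stop _ _ _ _ _ hn', aInner]
        simp only [bFlush, dif_neg hn]
        rw [aOuter]
        simp [hn, pvUpd]
    case pos =>
    constructor
    · -- idle state at line i
      intro acc
      rw [pvBLoop_step _ _ _ _ _ hn, aOuter]
      by_cases hblank : PySem.Str.strip (lines.getD i "") = ""
      · -- blank line: both sides skip it (a blank is never a nav label, by hpre)
        have hpre' := hpre i hn hblank
        simp only [bStep, dif_pos hn, hblank, hpre', eq_self_iff_true, if_true,
          Bool.false_eq_true, if_false]
        exact (ih (i + 1) (by omega)).1 acc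
      · by_cases hnav : nav_labels.contains (PySem.Str.strip (lines.getD i "")) = true
        · -- nav line: a run starts
          simp only [bStep, dif_pos hn, if_neg hblank, hnav, if_true, List.nil_append,
            zero_add]
          have h1 : pvCnt lines nav_labels [(i : Int)] = 1 := by
            have := pvCnt_append_nav lines nav_labels [] i hnav
            simpa [pvCnt] using this
          have hIH := (ih (i + 1) (by omega)).2 acc [(i : Int)] (by simp)
          rw [h1] at hIH
          rw [hIH]
          have hge := aInner_ge lines nav_labels (i + 1) [(i : Int)]
          have hnext : (if i + 1 < (aInner lines nav_labels (i + 1) [(i : Int)]).2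
              then (aInner lines nav_labels (i + 1) [(i : Int)]).2 else i + 1)
              = (aInner lines nav_labels (i + 1) [(i : Int)]).2 := by
            split <;> omega
          rw [hnext, pvUpd, pvCnt]
        · -- other line: flushing the idle state keeps it idle
          simp only [Bool.not_eq_true] at hnav
          simp only [bStep, dif_pos hn, if_neg hblank, hnav, Bool.false_eq_true, if_false]
          have hfl : bFlush threshold ((acc, [], 0, none) :
              PySem.Set Int × List Int × Int × Option Int) = (acc, [], 0, none) := by
            rw [bFlush]
            simp [PySem.Set.update]
          rw [hfl]
          exact (ih (i + 1) (by omega)).1 acc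
    · -- an open run (run, pvCnt run, no pending) at line i
      intro acc run hrun
      rw [pvBLoop_step _ _ _ _ _ hn, aInner]
      by_cases hblank : PySem.Str.strip (lines.getD i "") = ""
      · -- blank inside a run: B records it as pending
        simp only [bStep, dif_pos hn, hblank, eq_self_iff_true, if_true, if_neg hrun]
        by_cases hgood : i + 1 < lines.length ∧
            nav_labels.contains (PySem.Str.strip (lines.getD (i + 1) "")) = true
        · -- followed by a nav line: A keeps the blank; B resolves the pending at i+1
          obtain ⟨hn1, hnav1⟩ := hgood
          have hblank1 : ¬ PySem.Str.strip (lines.getD (i + 1) "") = "" := by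
            intro h; rw [h, hpre (i + 1) hn1 h] at hnav1; exact Bool.false_ne_true hnav1
          rw [pvBLoop_step _ _ _ _ _ hn1]
          simp only [bStep, if_neg hblank1, hnav1, if_true]
          rw [aInner]
          simp only [dif_pos hn1, dif_pos hn, hnav1, eq_self_iff_true, if_true,
            if_neg hblank1, hblank]
          have hnavi : nav_labels.contains (PySem.Str.strip (lines.getD i "")) = false := by
            rw [hblank]; exact hpre i hn hblank
          have hcnt : pvCnt lines nav_labels (run ++ [(i : Int)] ++ [((i + 1 : Nat) : Int)])
              = pvCnt lines nav_labels run + 1 := by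
            rw [pvCnt_append_nav lines nav_labels _ (i + 1) hnav1,
              pvCnt_append_blank lines nav_labels _ i hnavi]
          have hIH := (ih (i + 2) (by omega)).2 acc
              (run ++ [(i : Int)] ++ [((i + 1 : Nat) : Int)]) (by simp)
          rw [hcnt] at hIH
          push_cast at hIH ⊢
          simpa using hIH
        · -- break: A returns (run, i) and its outer loop skips line i (a blank);
          -- B drops the pending blank and flushes at i+1 (or at the end of input)
          have hnavi : nav_labels.contains (PySem.Str.strip (lines.getD i "")) = false := by
            rw [hblank]; exact hpre i hn hblank
          have hAouter : aOuter lines nav_labels threshold i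
                (pvUpd lines nav_labels threshold acc run)
              = aOuter lines nav_labels threshold (i + 1)
                (pvUpd lines nav_labels threshold acc run) := by
            rw [aOuter]
            simp only [dif_pos hn, hnavi, Bool.false_eq_true, if_false]
          by_cases h1 : i + 1 < lines.length
          · have hnav1 : nav_labels.contains (PySem.Str.strip (lines.getD (i + 1) "")) = false := by
              cases hx : nav_labels.contains (PySem.Str.strip (lines.getD (i + 1) "")) with
              | false => rfl
              | true => exact absurd ⟨h1, hx⟩ hgood
            simp only [dif_pos hn, dif_pos h1, hblank, eq_self_iff_true, if_true, hnav1,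
              Bool.false_eq_true, if_false]
            rw [pvBLoop_step _ _ _ _ _ h1]
            have hBstep : bStep nav_labels threshold
                (acc, run, pvCnt lines nav_labels run, some (i : Int))
                (((i + 1 : Nat) : Int), lines.getD (i + 1) "")
                = (pvUpd lines nav_labels threshold acc run, [], 0, none) := by
              by_cases hb1 : PySem.Str.strip (lines.getD (i + 1) "") = ""
              · rw [bStep]
                simp only [hb1, eq_self_iff_true, if_true, if_neg hrun, bFlush, pvUpd, pvCnt]
                rfl
              · rw [bStep]
                simp only [if_neg hb1, hnav1, Bool.false_eq_true, if_false, bFlush,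
                  pvUpd, pvCnt]
                rfl
            rw [hBstep, hAouter, aOuter]
            simp only [dif_pos h1, hnav1, Bool.false_eq_true, if_false]
            exact (ih (i + 2) (by omega)).1 _
          · -- the pending blank is the last line
            have hn1 : lines.length ≤ i + 1 := by omega
            simp only [dif_pos hn, dif_neg h1, hblank, eq_self_iff_true, if_true]
            rw [pvBLoop_stop _ _ _ _ _ hn1, hAouter, aOuter]
            simp only [dif_neg (show ¬ i + 1 < lines.length by omega)]
            rw [bFlush]
            simp only [pvUpd, pvCnt]
            rfl
      · by_cases hnav : nav_labels.contains (PySem.Str.strip (lines.getD i "")) = true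
        · -- nav line: both extend the run
          simp only [bStep, dif_pos hn, if_neg hblank, hnav, if_true]
          have hcnt := pvCnt_append_nav lines nav_labels run i hnav
          have hIH := (ih (i + 1) (by omega)).2 acc (run ++ [(i : Int)]) (by simp)
          rw [hcnt] at hIH
          simpa using hIH
        · -- other line: the run ends; B flushes, A's outer loop re-examines line i
          simp only [Bool.not_eq_true] at hnav
          simp only [bStep, dif_pos hn, if_neg hblank, hnav, Bool.false_eq_true, if_false]
          have hBfl : bFlush threshold
              ((acc, run, pvCnt lines nav_labels run, none) :
                PySem.Set Int × List Int × Int × Option Int)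
              = (pvUpd lines nav_labels threshold acc run, [], 0, none) := by
            rw [bFlush]
            simp only [pvUpd, pvCnt]
            rfl
          rw [hBfl]
          have hAouter : aOuter lines nav_labels threshold i
                (pvUpd lines nav_labels threshold acc run)
              = aOuter lines nav_labels threshold (i + 1)
                (pvUpd lines nav_labels threshold acc run) := by
            rw [aOuter]
            simp only [dif_pos hn, hnav, Bool.false_eq_true, if_false]
          rw [hAouter]
          exact (ih (i + 1) (by omega)).1 _

theorem find_nav_runs_spec : Claim_equal_find_nav_runs := by
  intro lines nav_labels threshold _hdom hpre
  unfold Spec_find_nav_runs find_nav_runs find_nav_runs_alt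
  have hpre' : ∀ k, k < lines.length → PySem.Str.strip (lines.getD k "") = "" →
      nav_labels.contains "" = false := by
    intro k hk hs
    rcases hpre with h | h
    · exact h
    · exact absurd hs (h (lines.getD k "") (by
        rw [List.getD_eq_getElem _ _ hk]; exact List.getElem_mem hk))
  have h := (pvMain lines nav_labels threshold hpre' lines.length 0 (by omega)).1
      PySem.Set.empty
  rw [← h]
  simp [pvBLoop]
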